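-- pv_equiv track=rewrite | github.com/hawaroaladar1/examples | gffggf/szuperprim.py | primekSzuper
-- ===== SOURCE A (Python) =====
-- def isPrim(num):
--     if num < 2:
--         return False
--     for i in range(2, num):
--         if num % i == 0:
--             return False
--     return True
--
-- def primekSzuper(szam):
--
--     szuperPrimek = []
--     sorszam = 0
--
--     for i in range(2, szam + 1):
--         if isPrim(i):
--             sorszam = sorszam + 1
--             if isPrim(sorszam):
--                 szuperPrimek.append(i)
--     return szuperPrimek
-- ===== SOURCE B (Python) =====
-- def primekSzuper(szam):
--     def is_prime(n):
--         if n < 2: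
--             return False
--         i = 2
--         while i * i <= n:
--             if n % i == 0:
--                 return False
--             i += 1
--         return True
--
--     primes = [i for i in range(2, szam + 1) if is_prime(i)]
--     return [p for idx, p in enumerate(primes, 1) if is_prime(idx)]
-- ===== Notes on version B (the rewrite author's own statement) =====
-- stated objective: faster
-- what changed: A trial-divides each candidate by every i in [2,n) inside one interleaved loop; B uses a sqrt-bounded primality test and two passes: first collect the primes up to szam, then keep those whose 1-based ordinal is itself prime.
import Mathlib
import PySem

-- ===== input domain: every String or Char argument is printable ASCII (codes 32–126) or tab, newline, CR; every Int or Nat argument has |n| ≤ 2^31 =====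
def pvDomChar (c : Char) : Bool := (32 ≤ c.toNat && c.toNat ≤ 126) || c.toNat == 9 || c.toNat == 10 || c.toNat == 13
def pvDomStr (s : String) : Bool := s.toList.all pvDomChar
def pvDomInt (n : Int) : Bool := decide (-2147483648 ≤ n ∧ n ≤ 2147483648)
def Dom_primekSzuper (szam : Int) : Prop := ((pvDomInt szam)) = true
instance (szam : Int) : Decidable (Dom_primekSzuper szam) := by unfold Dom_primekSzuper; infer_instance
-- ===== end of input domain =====

-- B replaces A's interleaved loop with per-candidate trial division over all of [2, n)
-- by two passes using a sqrt-bounded primality test: collect the primes up to szam,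
-- then keep those whose 1-based ordinal is itself prime.

-- ===== PORT A =====
-- isPrim(num): the early-return loop over range(2, num) is ported as List.any
def isPrimA (num : Int) : Bool :=
  if num < 2 then false
  else !((PySem.List.pyRange 2 num 1).any (fun i => PySem.Int.mod num i == 0))

def primekSzuper (szam : Int) : List Int :=
  ((PySem.List.pyRange 2 (szam + 1) 1).foldl
    (fun (st : List Int × Int) i =>
      if isPrimA i then
        ((if isPrimA (st.2 + 1) then st.1 ++ [i] else st.1), st.2 + 1)
      else st)
    ([], 0)).1

-- ===== PORT B =====
-- the 'while i*i <= n' loop of Source B's is_prime; i starts at 2 and only grows, so Nat is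
-- exact for it; fuel = n.toNat is a pure totality guard (the loop exits before it runs out)
def isPrimeGoB (n : Int) : Nat → Nat → Bool
  | 0, _ => true
  | fuel + 1, i =>
    if (i : Int) * (i : Int) ≤ n then
      if PySem.Int.mod n (i : Int) == 0 then false
      else isPrimeGoB n fuel (i + 1)
    else true

def isPrimeB (n : Int) : Bool :=
  if n < 2 then false else isPrimeGoB n n.toNat 2

def primekSzuper_alt (szam : Int) : List Int :=
  let primes := (PySem.List.pyRange 2 (szam + 1) 1).filter isPrimeB
  (PySem.List.enumerate primes 1).filterMap
    (fun q => if isPrimeB q.1 then some q.2 else none)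

-- ===== PRECONDITION & SPEC =====
def Spec_primekSzuper (szam : Int) (out : List Int) : Prop := out = primekSzuper_alt szam
instance (szam : Int) (out : List Int) : Decidable (Spec_primekSzuper szam out) := by unfold Spec_primekSzuper; infer_instance

-- ===== CLAIM (what is proved, stated in full; the proofs are below) =====
def Claim_equal_primekSzuper : Prop := ∀ (szam : Int), Dom_primekSzuper szam → Spec_primekSzuper szam (primekSzuper szam)

-- ===== LEMMAS AND PROOFS =====

-- characterisation of A's primality test
theorem isPrimA_true_iff (n : Int) :
    isPrimA n = true ↔ 2 ≤ n ∧ ∀ i : Int, 2 ≤ i → i < n → PySem.Int.mod n i ≠ 0 := by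
  unfold isPrimA
  split
  · constructor
    · intro h; simp at h
    · intro ⟨h, _⟩; omega
  · simp [PySem.List.mem_pyRange_one]
    rename_i hn
    intro _
    omega

-- characterisation of B's sqrt-bounded loop (the fuel bound guarantees the guard fails at 0)
theorem isPrimeGoB_true_iff (n : Int) (fuel i0 : Nat)
    (hf : n < ((i0 + fuel : Nat) : Int) * ((i0 + fuel : Nat) : Int)) :
    isPrimeGoB n fuel i0 = true ↔
      ∀ i : Nat, i0 ≤ i → (i : Int) * (i : Int) ≤ n → PySem.Int.mod n (i : Int) ≠ 0 := by
  induction fuel generalizing i0 with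
  | zero =>
    simp only [isPrimeGoB, true_iff]
    intro j hj hsq
    exfalso
    have hij : ((i0 : Int)) ≤ (j : Int) := by exact_mod_cast hj
    have h0 : (0 : Int) ≤ (i0 : Int) := Int.natCast_nonneg i0
    simp only [Nat.add_zero] at hf
    nlinarith
  | succ fuel ih =>
    rw [isPrimeGoB]
    have hf' : n < ((i0 + 1 + fuel : Nat) : Int) * ((i0 + 1 + fuel : Nat) : Int) := by
      have : i0 + 1 + fuel = i0 + (fuel + 1) := by omega
      rw [this]; exact hf
    split
    · rename_i h
      split
      · rename_i hm
        simp only [Bool.false_eq_true, false_iff]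
        intro H
        exact H i0 (le_refl i0) h (by simpa using hm)
      · rename_i hm
        rw [ih (i0 + 1) hf']
        constructor
        · intro H j hj hsq
          rcases Nat.eq_or_lt_of_le hj with rfl | hlt
          · simpa using hm
          · exact H j hlt hsq
        · intro H j hj hsq
          exact H j (Nat.le_of_succ_le hj) hsq
    · rename_i h
      simp only [true_iff]
      intro j hj hsq
      exfalso
      apply h
      have hij : (i0 : Int) ≤ (j : Int) := by exact_mod_cast hj
      have h0 : (0 : Int) ≤ (i0 : Int) := Int.natCast_nonneg i0
      nlinarith

-- the two primality tests agree on every Int (the hard direction uses Nat.minFac)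
theorem prim_eq : isPrimA = isPrimeB := by
  funext n
  by_cases hn : n < 2
  · unfold isPrimA isPrimeB
    simp [hn]
  · rw [Bool.eq_iff_iff, isPrimA_true_iff]
    unfold isPrimeB
    rw [if_neg hn, isPrimeGoB_true_iff n n.toNat 2 (by
      have h2 : ((2 + n.toNat : Nat) : Int) = 2 + (n.toNat : Int) := by push_cast; ring
      have hm : ((n.toNat : Int)) = n := Int.toNat_of_nonneg (by omega)
      rw [h2]
      nlinarith [hm])]
    simp only [Ne, PySem.Int.mod_eq_zero_iff_dvd]
    constructor
    · intro H j hj hsq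
      have hj2 : (2 : Int) ≤ (j : Int) := by exact_mod_cast hj
      have hlt : (j : Int) < n := by nlinarith
      exact H.2 j hj2 hlt
    · intro H
      refine ⟨by omega, ?_⟩
      intro i hi2 hin hdvd
      have hm : ((n.toNat : Int)) = n := Int.toNat_of_nonneg (by omega)
      have hai : ((i.toNat : Int)) = i := Int.toNat_of_nonneg (by omega)
      have ha2 : 2 ≤ i.toNat := by omega
      have halt : i.toNat < n.toNat := by omega
      have hadvd : i.toNat ∣ n.toNat := by
        rw [← hai, ← hm] at hdvd
        exact_mod_cast hdvd
      have hnp : ¬ Nat.Prime n.toNat := by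
        intro hp
        rcases hp.eq_one_or_self_of_dvd _ hadvd with h1 | hs
        · omega
        · omega
      have hkp := Nat.minFac_prime (show n.toNat ≠ 1 by omega)
      have hksq : n.toNat.minFac * n.toNat.minFac ≤ n.toNat := by
        have := Nat.minFac_sq_le_self (show 0 < n.toNat by omega) hnp
        simpa [Nat.pow_two] using this
      apply H n.toNat.minFac hkp.two_le
      · have h1 : ((n.toNat.minFac * n.toNat.minFac : Nat) : Int) ≤ (n.toNat : Int) := by
          exact_mod_cast hksq
        push_cast at h1
        rw [hm] at h1
        exact h1
      · rw [← hm]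
        exact_mod_cast Nat.minFac_dvd n.toNat

-- B's second pass, generalised over the running ordinal offset
def pickB (c : Int) (ps : List Int) : List Int :=
  (PySem.List.enumerate ps (c + 1)).filterMap
    (fun q => if isPrimeB q.1 then some q.2 else none)

-- A's interleaved fold equals B's filter-then-ordinal-filter composition
theorem fold_eq (l : List Int) (acc : List Int) (c : Int) :
    (l.foldl
      (fun (st : List Int × Int) i =>
        if isPrimeB i then
          ((if isPrimeB (st.2 + 1) then st.1 ++ [i] else st.1), st.2 + 1)
        else st)
      (acc, c)).1 = acc ++ pickB c (l.filter isPrimeB) := by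
  induction l generalizing acc c with
  | nil => simp [pickB, PySem.List.enumerate_nil]
  | cons a l ih =>
    simp only [List.foldl_cons, List.filter_cons]
    by_cases ha : isPrimeB a
    · simp only [ha, if_true]
      rw [ih]
      unfold pickB
      rw [PySem.List.enumerate_cons]
      have hc : c + 1 + 1 = c + 2 := by ring
      simp only [List.filterMap_cons, hc]
      by_cases hb : isPrimeB (c + 1)
      · simp [hb]
      · simp [hb]
    · simp only [ha, if_false, Bool.false_eq_true]
      exact ih acc c

-- ===== VERDICT (by name: the statement is the Claim_ definition above) =====
theorem primekSzuper_spec : Claim_equal_primekSzuper := by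
  intro szam _
  unfold Spec_primekSzuper primekSzuper primekSzuper_alt
  rw [prim_eq]
  rw [fold_eq]
  simp [pickB]
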